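-- pv_equiv track=rewrite | github.com/lzyrapx/Competitive-Programming | LeetCode/Easy/944.py | minDeletionSize
-- ===== SOURCE A (Python) =====
-- from typing import List
--
-- def minDeletionSize(A: List[str]) -> int:
--     ans = []
--     for i in range(len(A) - 1):
--         for j in range(len(A[0])):
--             if A[i][j] > A[i + 1][j]:
--                 if j not in ans:
--                     ans.append(j)
--     return len(ans)
-- ===== SOURCE B (Python) =====
-- def minDeletionSize(A):
--     return sum(list(col) != sorted(col) for col in zip(*A))
-- ===== Notes on version B (the rewrite author's own statement) =====
-- stated objective: simpler
-- what changed: Replaces the nested index loops that scan every adjacent row pair and maintain a dedup list of bad column indices with a one-liner that transposes the grid via zip(*A) and counts columns that differ from their sorted form.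
import Mathlib
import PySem

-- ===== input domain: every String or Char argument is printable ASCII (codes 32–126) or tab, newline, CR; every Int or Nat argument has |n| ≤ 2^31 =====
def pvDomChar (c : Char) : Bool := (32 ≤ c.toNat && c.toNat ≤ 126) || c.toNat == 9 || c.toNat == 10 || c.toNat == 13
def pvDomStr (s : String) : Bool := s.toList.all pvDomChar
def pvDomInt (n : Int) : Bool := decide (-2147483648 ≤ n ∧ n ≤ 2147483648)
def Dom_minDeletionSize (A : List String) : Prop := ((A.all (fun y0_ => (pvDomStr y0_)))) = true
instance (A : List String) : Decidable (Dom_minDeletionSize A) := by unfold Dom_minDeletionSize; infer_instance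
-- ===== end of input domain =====

-- B transposes the grid and counts columns differing from their sorted form; simpler than A's
-- nested adjacent-pair scan with a dedup list of bad column indices.

-- ===== PORT A =====
-- A[i][j] via pyGetD; exact inside Pre_ (all indices in range there).
def minDeletionSize (A : List String) : Int :=
  let ans : List Int :=
    (PySem.List.pyRange 0 ((A.length : Int) - 1) 1).foldl (fun ans i =>
      (PySem.List.pyRange 0 ((A.headD "").length : Int) 1).foldl (fun ans j =>
        if PySem.List.pyGetD (PySem.List.pyGetD A i "").toList j ' ' >
           PySem.List.pyGetD (PySem.List.pyGetD A (i + 1) "").toList j ' ' then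
          if j ∈ ans then ans else ans ++ [j]
        else ans) ans) []
  (ans.length : Int)

-- ===== PORT B =====
-- zip(*rows): take heads as long as every row is nonempty, then recurse on the tails.
-- (fuel = first row's length, which bounds the number of steps; it only makes the recursion structural)
def pvZipColsAux : Nat → List (List Char) → List (List Char)
  | 0, _ => []
  | fuel + 1, rows =>
    if rows ≠ [] ∧ ∀ r ∈ rows, r ≠ [] then
      rows.map (fun r => r.headD ' ') :: pvZipColsAux fuel (rows.map List.tail)
    else []

def pvZipCols (rows : List (List Char)) : List (List Char) :=
  pvZipColsAux (rows.headD []).length rows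

def minDeletionSize_alt (A : List String) : Int :=
  ((pvZipCols (A.map String.toList)).map (fun col =>
      if col ≠ PySem.List.sorted col (fun x => x) false then (1 : Int) else 0)).sum

-- ===== PRECONDITION & SPEC =====
-- Pre_ excludes exactly the ragged grids on which A raises IndexError (a row shorter than the first row).
def Pre_minDeletionSize (A : List String) : Prop :=
  ∀ s ∈ A, (A.headD "").length ≤ s.length
instance (A : List String) : Decidable (Pre_minDeletionSize A) := by
  unfold Pre_minDeletionSize; infer_instance

def pvWitness_minDeletionSize : List String := ["cba", "daf", "ghi"]

def Spec_minDeletionSize (A : List String) (out : Int) : Prop := out = minDeletionSize_alt A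
instance (A : List String) (out : Int) : Decidable (Spec_minDeletionSize A out) := by
  unfold Spec_minDeletionSize; infer_instance

-- ===== CLAIM (what is proved, stated in full; the proofs are below) =====
def Claim_equal_minDeletionSize : Prop :=
  ∀ (A : List String), Dom_minDeletionSize A → Pre_minDeletionSize A →
    Spec_minDeletionSize A (minDeletionSize A)

-- ===== LEMMAS AND PROOFS =====

-- inner fold lemmas
theorem pvInner_mem (c : Int → Prop) [DecidablePred c] (J : List Int) :
    ∀ (ans : List Int) (x : Int),
      (x ∈ J.foldl (fun ans j => if c j then (if j ∈ ans then ans else ans ++ [j]) else ans) ans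
        ↔ x ∈ ans ∨ (x ∈ J ∧ c x)) := by
  induction J with
  | nil => simp
  | cons j J ih =>
    intro ans x
    simp only [List.foldl_cons, List.mem_cons]
    by_cases hc : c j
    · by_cases hj : j ∈ ans
      · rw [if_pos hc, if_pos hj, ih]
        constructor
        · rintro (h | h) <;> tauto
        · rintro (h | ⟨(rfl | h), hx⟩) <;> tauto
      · rw [if_pos hc, if_neg hj, ih]
        simp only [List.mem_append, List.mem_singleton]
        constructor
        · rintro ((h | rfl) | h) <;> tauto
        · rintro (h | ⟨(rfl | h), hx⟩) <;> tauto
    · rw [if_neg hc, ih]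
      constructor
      · rintro (h | h) <;> tauto
      · rintro (h | ⟨(rfl | h), hx⟩) <;> tauto

theorem pvInner_nodup (c : Int → Prop) [DecidablePred c] (J : List Int) :
    ∀ (ans : List Int), ans.Nodup →
      (J.foldl (fun ans j => if c j then (if j ∈ ans then ans else ans ++ [j]) else ans) ans).Nodup := by
  induction J with
  | nil => simpa
  | cons j J ih =>
    intro ans hans
    simp only [List.foldl_cons]
    by_cases hc : c j
    · by_cases hj : j ∈ ans
      · rw [if_pos hc, if_pos hj]; exact ih ans hans
      · rw [if_pos hc, if_neg hj]
        exact ih _ (by simp [List.nodup_append, hans]; exact fun a ha h => hj (h ▸ ha))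
    · rw [if_neg hc]; exact ih ans hans

theorem pvOuter_mem (c : Int → Int → Prop) [∀ i, DecidablePred (c i)] (J : List Int) (I : List Int) :
    ∀ (ans : List Int) (x : Int),
      (x ∈ I.foldl (fun ans i =>
          J.foldl (fun ans j => if c i j then (if j ∈ ans then ans else ans ++ [j]) else ans) ans) ans
        ↔ x ∈ ans ∨ ∃ i ∈ I, x ∈ J ∧ c i x) := by
  induction I with
  | nil => simp
  | cons i I ih =>
    intro ans x
    simp only [List.foldl_cons, List.mem_cons]
    rw [ih, pvInner_mem]
    constructor
    · rintro ((h | h) | ⟨i', hi', h⟩) <;> first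
      | exact Or.inl h
      | exact Or.inr ⟨i, Or.inl rfl, h.1, h.2⟩
      | exact Or.inr ⟨i', Or.inr hi', h⟩
    · rintro (h | ⟨i', (rfl | hi'), h⟩)
      · exact Or.inl (Or.inl h)
      · exact Or.inl (Or.inr h)
      · exact Or.inr ⟨i', hi', h⟩

theorem pvOuter_nodup (c : Int → Int → Prop) [∀ i, DecidablePred (c i)] (J : List Int) (I : List Int) :
    ∀ (ans : List Int), ans.Nodup →
      (I.foldl (fun ans i =>
          J.foldl (fun ans j => if c i j then (if j ∈ ans then ans else ans ++ [j]) else ans) ans) ans).Nodup := by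
  induction I with
  | nil => simpa
  | cons i I ih =>
    intro ans hans
    simp only [List.foldl_cons]
    exact ih _ (pvInner_nodup (c i) J ans hans)


theorem pvZipColsAux_eq : ∀ (fuel : Nat) (rows : List (List Char)),
    (rows.headD []).length ≤ fuel →
    (∀ r ∈ rows, (rows.headD []).length ≤ r.length) →
    pvZipColsAux fuel rows
      = (List.range (rows.headD []).length).map (fun j => rows.map (fun r => r.getD j ' ')) := by
  intro fuel
  induction fuel with
  | zero =>
    intro rows hle _
    have h0 : (rows.headD []).length = 0 := Nat.le_zero.mp hle
    rw [h0]
    simp [pvZipColsAux]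
  | succ fuel ih =>
    intro rows hle hall
    cases rows with
    | nil => simp [pvZipColsAux]
    | cons r rs =>
      simp only [List.headD_cons] at hle hall ⊢
      cases hr : r with
      | nil =>
        subst hr
        rw [pvZipColsAux]
        rw [if_neg (by simp)]
        simp
      | cons ch cs =>
        subst hr
        have hcond : ((ch :: cs) :: rs ≠ [] ∧ ∀ r ∈ (ch :: cs) :: rs, r ≠ []) := by
          refine ⟨by simp, ?_⟩
          intro r' hr'
          have := hall r' hr'
          intro h; subst h; simp at this
        rw [pvZipColsAux, if_pos hcond]
        have htl : ∀ t ∈ (((ch :: cs) :: rs).map List.tail),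
            ((((ch :: cs) :: rs).map List.tail).headD []).length ≤ t.length := by
          simp only [List.map_cons, List.headD_cons, List.tail_cons, List.mem_cons]
          rintro t (rfl | ht)
          · exact le_refl _
          · obtain ⟨r', hr', rfl⟩ := List.mem_map.mp ht
            have := hall r' (List.mem_cons_of_mem _ hr')
            cases r' with
            | nil => simp at this
            | cons a as => simpa using Nat.le_of_succ_le_succ (by simpa using this)
        rw [ih _ (by simpa using Nat.le_of_succ_le_succ hle) htl]
        simp only [List.map_cons, List.headD_cons, List.tail_cons, List.length_cons]
        rw [List.range_succ_eq_map]
        simp only [List.map_cons, List.map_map]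
        congr 1
        · -- heads column = getD 0 column
          simp only [List.getD_cons_zero]
          congr 1
          apply List.map_congr_left
          intro r' hr'
          have := hall r' (List.mem_cons_of_mem _ hr')
          cases r' with
          | nil => simp at this
          | cons a as => simp
        · apply List.map_congr_left
          intro k _
          simp only [Function.comp, List.getD_cons_succ]
          congr 1
          apply List.map_congr_left
          intro r' hr'
          have := hall r' (List.mem_cons_of_mem _ hr')
          cases r' with
          | nil => simp at this
          | cons a as => simp

theorem pv_col_sorted_iff (col : List Char) :
    (col ≠ PySem.List.sorted col (fun x => x) false) ↔ ¬ col.Pairwise (· ≤ ·) := by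
  constructor
  · intro hne hp
    apply hne
    have h2 := PySem.List.sorted_eq_self_of_pairwise (xs := col) (key := fun x => x) (by simpa using hp)
    exact h2.symm
  · intro hnp heq
    apply hnp
    rw [heq]
    exact PySem.List.sorted_pairwise col (fun x => x)

theorem pv_pointwise (A : List String) (jn : Nat) :
    (∃ i ∈ PySem.List.pyRange 0 ((A.length : Int) - 1) 1,
        PySem.List.pyGetD (PySem.List.pyGetD A i "").toList (jn : Int) ' ' >
        PySem.List.pyGetD (PySem.List.pyGetD A (i + 1) "").toList (jn : Int) ' ')
      ↔ ¬ (A.map (fun s => s.toList.getD jn ' ')).Pairwise (· ≤ ·) := by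
  rw [← List.isChain_iff_pairwise, List.isChain_iff_getElem]
  push_neg
  have hval : ∀ (k : Nat) (hk : k < A.length),
      PySem.List.pyGetD (PySem.List.pyGetD A ((k : Nat) : Int) "").toList (jn : Int) ' '
        = (A.map (fun s => s.toList.getD jn ' '))[k]'(by simpa using hk) := by
    intro k hk
    simp [PySem.List.pyGetD_natCast, List.getElem?_eq_getElem hk]
  constructor
  · rintro ⟨i, hi, hlt⟩
    rw [PySem.List.mem_pyRange_one] at hi
    obtain ⟨h0, h1⟩ := hi
    have hk1 : i.toNat + 1 < A.length := by omega
    refine ⟨i.toNat, by simpa using hk1, ?_⟩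
    have e1 : i = ((i.toNat : Nat) : Int) := by omega
    rw [e1] at hlt
    have e2 : ((i.toNat : Nat) : Int) + 1 = (((i.toNat + 1 : Nat)) : Int) := by push_cast; ring
    rw [e2] at hlt
    rw [hval i.toNat (by omega), hval (i.toNat + 1) hk1] at hlt
    exact hlt
  · rintro ⟨k, hk, hlt⟩
    simp only [List.length_map] at hk
    refine ⟨(k : Int), ?_, ?_⟩
    · rw [PySem.List.mem_pyRange_one]; omega
    · have e2 : ((k : Nat) : Int) + 1 = (((k + 1 : Nat)) : Int) := by omega
      rw [e2, hval k (by omega), hval (k + 1) hk]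
      exact hlt

theorem minDeletionSize_main : ∀ (A : List String),
    (∀ s ∈ A, (A.headD "").length ≤ s.length) →
    minDeletionSize A = minDeletionSize_alt A := by
  intro A hpre
  simp only [minDeletionSize, minDeletionSize_alt, pvZipCols]
  have hrowshead : ((A.map String.toList).headD []) = (A.headD "").toList := by
    cases A <;> simp
  have hm : ((A.map String.toList).headD []).length = (A.headD "").length := by
    rw [hrowshead, String.length_toList]
  -- B side: columns
  have hlen2 : ∀ r ∈ A.map String.toList, ((A.map String.toList).headD []).length ≤ r.length := by
    intro r hr
    obtain ⟨s, hs, rfl⟩ := List.mem_map.mp hr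
    rw [hm, String.length_toList]
    exact hpre s hs
  have hBcols := pvZipColsAux_eq (((A.map String.toList).headD []).length)
    (A.map String.toList) (le_refl _) hlen2
  rw [hBcols, hm, List.map_map]
  simp only [Function.comp_def]
  have hB := PySem.List.sum_map_ite_one_zero'
    (fun j => (A.map String.toList).map (fun r => r.getD j ' ')
        ≠ PySem.List.sorted ((A.map String.toList).map (fun r => r.getD j ' ')) (fun x => x) false)
    (List.range (A.headD "").length)
  rw [hB]
  -- A side
  have hmem := pvOuter_mem
    (fun i j => PySem.List.pyGetD (PySem.List.pyGetD A i "").toList j ' ' >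
                PySem.List.pyGetD (PySem.List.pyGetD A (i + 1) "").toList j ' ')
    (PySem.List.pyRange 0 ((A.headD "").length : Int) 1)
    (PySem.List.pyRange 0 ((A.length : Int) - 1) 1) []
  have hnodup := pvOuter_nodup
    (fun i j => PySem.List.pyGetD (PySem.List.pyGetD A i "").toList j ' ' >
                PySem.List.pyGetD (PySem.List.pyGetD A (i + 1) "").toList j ' ')
    (PySem.List.pyRange 0 ((A.headD "").length : Int) 1)
    (PySem.List.pyRange 0 ((A.length : Int) - 1) 1) [] List.nodup_nil
  have hperm : ((PySem.List.pyRange 0 ((A.length : Int) - 1) 1).foldl (fun ans i =>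
      (PySem.List.pyRange 0 ((A.headD "").length : Int) 1).foldl (fun ans j =>
        if PySem.List.pyGetD (PySem.List.pyGetD A i "").toList j ' ' >
           PySem.List.pyGetD (PySem.List.pyGetD A (i + 1) "").toList j ' ' then
          if j ∈ ans then ans else ans ++ [j]
        else ans) ans) ([] : List Int)).Perm
      ((PySem.List.pyRange 0 ((A.headD "").length : Int) 1).filter
        (fun j => (PySem.List.pyRange 0 ((A.length : Int) - 1) 1).any
          (fun i => decide (PySem.List.pyGetD (PySem.List.pyGetD A i "").toList j ' ' >
            PySem.List.pyGetD (PySem.List.pyGetD A (i + 1) "").toList j ' ')))) := by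
    refine (List.perm_ext_iff_of_nodup hnodup ?_).mpr ?_
    · exact (PySem.List.nodup_pyRange_one _ _).filter _
    · intro x
      rw [List.mem_filter, hmem x]
      simp only [List.not_mem_nil, false_or, List.any_eq_true, decide_eq_true_eq]
      constructor
      · rintro ⟨i, hi, hx, hc⟩
        exact ⟨hx, i, hi, hc⟩
      · rintro ⟨hx, i, hi, hc⟩
        exact ⟨i, hi, hx, hc⟩
  rw [hperm.length_eq, ← List.countP_eq_length_filter]
  have hJ : PySem.List.pyRange 0 (((A.headD "").length : Nat) : Int) 1
      = (List.range (A.headD "").length).map (fun k => ((k : Nat) : Int)) := by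
    rw [PySem.List.pyRange_one]
    simp
  rw [hJ, List.countP_map]
  apply congrArg
  apply List.countP_congr
  intro k hk
  rw [Bool.eq_iff_iff]
  simp only [Function.comp_apply, List.any_eq_true, decide_eq_true_eq]
  have hmapmap : (A.map String.toList).map (fun r => r.getD k ' ')
      = A.map (fun s => s.toList.getD k ' ') := by
    rw [List.map_map]; rfl
  rw [hmapmap, pv_col_sorted_iff, ← pv_pointwise A k]
  tauto
-- ===== VERDICT (by name: the statement is the Claim_ definition above) =====
theorem minDeletionSize_spec : Claim_equal_minDeletionSize := by
  intro A _ hpre; exact minDeletionSize_main A hpre
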